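-- pv_equiv track=rewrite | github.com/pypi-data/pypi-mirror-248 | packages/mlkit-lyt/mlkit_lyt-0.0.3.tar.gz/mlkit_lyt-0.0.3/mlkit_lyt/common/_process.py | underSampling
-- ===== SOURCE A (Python) =====
-- def underSampling(dataset, labels, aimedLabel, times):
--   new_x = []
--   new_y = []
--   cnt = 0
--   idx = 0
--   for label in labels:
--     if label == aimedLabel:
--       cnt +=1
--       if cnt >= times:
--         new_x.append(dataset[idx])
--         new_y.append(label)
--     idx += 1
--
--   return new_x, new_y
-- ===== SOURCE B (Python) =====
-- def underSampling(dataset, labels, aimedLabel, times):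
--     idxs = [i for i, l in enumerate(labels) if l == aimedLabel]
--     kept = idxs[max(times - 1, 0):]
--     return [dataset[i] for i in kept], [labels[i] for i in kept]
-- ===== Notes on version B (the rewrite author's own statement) =====
-- stated objective: alternative
-- what changed: Replaces A's single interleaved loop with manual cnt/idx counters by a two-pass decomposition: collect the indices of all aimed-label occurrences, slice off the first times-1 of them, then gather rows by index.
import Mathlib
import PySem

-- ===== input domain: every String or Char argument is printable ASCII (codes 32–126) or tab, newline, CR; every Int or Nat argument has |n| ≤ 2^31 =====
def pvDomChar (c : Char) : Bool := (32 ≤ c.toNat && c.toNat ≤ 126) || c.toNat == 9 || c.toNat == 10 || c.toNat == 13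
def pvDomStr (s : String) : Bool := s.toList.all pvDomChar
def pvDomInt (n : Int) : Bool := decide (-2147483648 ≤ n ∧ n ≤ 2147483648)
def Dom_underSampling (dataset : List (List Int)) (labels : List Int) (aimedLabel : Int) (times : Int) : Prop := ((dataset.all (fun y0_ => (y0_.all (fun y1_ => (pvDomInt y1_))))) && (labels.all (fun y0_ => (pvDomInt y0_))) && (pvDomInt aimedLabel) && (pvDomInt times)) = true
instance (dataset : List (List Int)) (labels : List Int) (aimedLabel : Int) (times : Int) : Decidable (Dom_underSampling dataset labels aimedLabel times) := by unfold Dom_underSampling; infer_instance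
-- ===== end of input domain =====

-- B replaces A's single interleaved loop by a two-pass decomposition (collect match indices, slice, gather); alternative, not faster.


-- ===== PORT A =====
def underSampling (dataset : List (List Int)) (labels : List Int) (aimedLabel : Int) (times : Int) : List (List Int) × List Int :=
  let r := labels.foldl
    (fun (st : List (List Int) × List Int × Int × Int) label =>
      if label = aimedLabel then
        if st.2.2.1 + 1 ≥ times then
          (st.1 ++ [(PySem.List.pyGet? dataset st.2.2.2).getD []], st.2.1 ++ [label],
           st.2.2.1 + 1, st.2.2.2 + 1)
        else (st.1, st.2.1, st.2.2.1 + 1, st.2.2.2 + 1)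
      else (st.1, st.2.1, st.2.2.1, st.2.2.2 + 1))
    ([], [], 0, 0)
  (r.1, r.2.1)

-- ===== PORT B =====
def underSampling_alt (dataset : List (List Int)) (labels : List Int) (aimedLabel : Int) (times : Int) : List (List Int) × List Int :=
  let idxs := ((PySem.List.enumerate labels 0).filter (fun p => p.2 = aimedLabel)).map (·.1)
  let kept := PySem.List.slice idxs (some (max (times - 1) 0)) none
  (kept.map (fun i => (PySem.List.pyGet? dataset i).getD []),
   kept.map (fun i => (PySem.List.pyGet? labels i).getD 0))

-- ===== PRECONDITION & SPEC =====
-- Pre_ excludes exactly the inputs where Python A raises IndexError (a kept aimed-label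
-- position beyond the end of dataset); Python B raises there too.
def Pre_underSampling (dataset : List (List Int)) (labels : List Int) (aimedLabel : Int) (times : Int) : Prop :=
  ∀ k : Nat, k < labels.length → labels.getD k 0 = aimedLabel →
    times ≤ ((labels.take (k + 1)).count aimedLabel : Int) → k < dataset.length
instance (dataset : List (List Int)) (labels : List Int) (aimedLabel : Int) (times : Int) : Decidable (Pre_underSampling dataset labels aimedLabel times) := by unfold Pre_underSampling; infer_instance

def pvWitness_underSampling : List (List Int) × List Int × Int × Int := ([[1], [2], [3]], [0, 1, 1], 1, 2)

def Spec_underSampling (dataset : List (List Int)) (labels : List Int) (aimedLabel : Int) (times : Int) (out : List (List Int) × List Int) : Prop := out = underSampling_alt dataset labels aimedLabel times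
instance (dataset : List (List Int)) (labels : List Int) (aimedLabel : Int) (times : Int) (out : List (List Int) × List Int) : Decidable (Spec_underSampling dataset labels aimedLabel times out) := by unfold Spec_underSampling; infer_instance

-- ===== CLAIM (what is proved, stated in full; the proofs are below) =====
def Claim_equal_underSampling : Prop := ∀ (dataset : List (List Int)) (labels : List Int) (aimedLabel : Int) (times : Int), Dom_underSampling dataset labels aimedLabel times → Pre_underSampling dataset labels aimedLabel times → Spec_underSampling dataset labels aimedLabel times (underSampling dataset labels aimedLabel times)

-- ===== LEMMAS AND PROOFS =====

-- absolute indices (starting at s) of the occurrences of a in ls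
def mIdx (a : Int) : List Int → Int → List Int
  | [], _ => []
  | l :: ls, s => if l = a then s :: mIdx a ls (s + 1) else mIdx a ls (s + 1)

-- A's loop, cons-form, without the accumulators
def goA (dataset : List (List Int)) (a times : Int) : List Int → Int → Int → List (List Int) × List Int
  | [], _, _ => ([], [])
  | l :: ls, cnt, idx =>
    if l = a then
      let r := goA dataset a times ls (cnt + 1) (idx + 1)
      if cnt + 1 ≥ times then ((PySem.List.pyGet? dataset idx).getD [] :: r.1, l :: r.2) else r
    else goA dataset a times ls cnt (idx + 1)

theorem foldl_eq_goA (dataset : List (List Int)) (a times : Int) :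
    ∀ (ls : List Int) (nx : List (List Int)) (ny : List Int) (cnt idx : Int),
      ls.foldl
        (fun (st : List (List Int) × List Int × Int × Int) label =>
          if label = a then
            if st.2.2.1 + 1 ≥ times then
              (st.1 ++ [(PySem.List.pyGet? dataset st.2.2.2).getD []], st.2.1 ++ [label],
               st.2.2.1 + 1, st.2.2.2 + 1)
            else (st.1, st.2.1, st.2.2.1 + 1, st.2.2.2 + 1)
          else (st.1, st.2.1, st.2.2.1, st.2.2.2 + 1)) (nx, ny, cnt, idx)
      = (nx ++ (goA dataset a times ls cnt idx).1,
         ny ++ (goA dataset a times ls cnt idx).2,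
         (ls.foldl
        (fun (st : List (List Int) × List Int × Int × Int) label =>
          if label = a then
            if st.2.2.1 + 1 ≥ times then
              (st.1 ++ [(PySem.List.pyGet? dataset st.2.2.2).getD []], st.2.1 ++ [label],
               st.2.2.1 + 1, st.2.2.2 + 1)
            else (st.1, st.2.1, st.2.2.1 + 1, st.2.2.2 + 1)
          else (st.1, st.2.1, st.2.2.1, st.2.2.2 + 1)) (nx, ny, cnt, idx)).2.2) := by
  intro ls
  induction ls with
  | nil => intro nx ny cnt idx; simp [goA]
  | cons l ls ih =>
    intro nx ny cnt idx
    by_cases hl : l = a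
    · subst hl
      by_cases ht : cnt + 1 ≥ times
      · simp only [List.foldl_cons, if_true, if_pos ht, goA]
        rw [ih]
        simp
      · simp only [List.foldl_cons, if_true, if_neg ht, goA]
        rw [ih]
    · simp only [List.foldl_cons, if_neg hl, goA]
      rw [ih]

theorem goA_eq (dataset : List (List Int)) (a times : Int) :
    ∀ (ls : List Int) (cnt idx : Int),
      goA dataset a times ls cnt idx
      = (((mIdx a ls idx).drop (times - 1 - cnt).toNat).map
           (fun i => (PySem.List.pyGet? dataset i).getD []),
         ((mIdx a ls idx).drop (times - 1 - cnt).toNat).map (fun _ => a)) := by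
  intro ls
  induction ls with
  | nil => intro cnt idx; simp [goA, mIdx]
  | cons l ls ih =>
    intro cnt idx
    by_cases hl : l = a
    · subst hl
      by_cases ht : cnt + 1 ≥ times
      · have h0 : (times - 1 - cnt).toNat = 0 := by omega
        have h0' : (times - 1 - (cnt + 1)).toNat = 0 := by omega
        simp only [goA, mIdx, if_true, if_pos ht, ih, h0, h0', List.drop_zero, List.map_cons]
      · have h1 : (times - 1 - cnt).toNat = (times - 1 - (cnt + 1)).toNat + 1 := by omega
        simp only [goA, mIdx, if_true, if_neg ht, ih, h1, List.drop_succ_cons]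
    · simp only [goA, mIdx, if_neg hl, ih]

theorem filter_enumerate_eq_mIdx (a : Int) :
    ∀ (ls : List Int) (s : Int),
      ((PySem.List.enumerate ls s).filter (fun p => p.2 = a)).map (·.1) = mIdx a ls s := by
  intro ls
  induction ls with
  | nil => intro s; simp [PySem.List.enumerate_nil, mIdx]
  | cons l ls ih =>
    intro s
    by_cases hl : l = a
    · simp [PySem.List.enumerate_cons, mIdx, hl, ih]
    · simp [PySem.List.enumerate_cons, mIdx, hl, ih]

theorem mem_mIdx (a : Int) :
    ∀ (ls : List Int) (s i : Int), i ∈ mIdx a ls s →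
      ∃ k : Nat, i = s + k ∧ ls[k]? = some a := by
  intro ls
  induction ls with
  | nil => intro s i h; simp [mIdx] at h
  | cons l ls ih =>
    intro s i h
    by_cases hl : l = a
    · simp only [mIdx, if_pos hl, List.mem_cons] at h
      cases h with
      | inl h => exact ⟨0, by omega, by simp [hl]⟩
      | inr h =>
        obtain ⟨k, hk, hget⟩ := ih (s + 1) i h
        exact ⟨k + 1, by omega, by simpa using hget⟩
    · simp only [mIdx, if_neg hl] at h
      obtain ⟨k, hk, hget⟩ := ih (s + 1) i h
      exact ⟨k + 1, by omega, by simpa using hget⟩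

theorem underSampling_eq (dataset : List (List Int)) (labels : List Int) (a times : Int) :
    underSampling dataset labels a times
    = (((mIdx a labels 0).drop (times - 1).toNat).map
         (fun i => (PySem.List.pyGet? dataset i).getD []),
       ((mIdx a labels 0).drop (times - 1).toNat).map (fun _ => a)) := by
  unfold underSampling
  rw [foldl_eq_goA, goA_eq]
  simp

theorem underSampling_alt_eq (dataset : List (List Int)) (labels : List Int) (a times : Int) :
    underSampling_alt dataset labels a times
    = (((mIdx a labels 0).drop (times - 1).toNat).map
         (fun i => (PySem.List.pyGet? dataset i).getD []),
       ((mIdx a labels 0).drop (times - 1).toNat).map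
         (fun i => (PySem.List.pyGet? labels i).getD 0)) := by
  have hmax : (max (times - 1) 0).toNat = (times - 1).toNat := by omega
  unfold underSampling_alt
  simp only [filter_enumerate_eq_mIdx,
    PySem.List.slice_from _ (show (0 : Int) ≤ max (times - 1) 0 by omega), hmax]

theorem labels_get_of_mem_mIdx (labels : List Int) (a i : Int)
    (h : i ∈ mIdx a labels 0) : (PySem.List.pyGet? labels i).getD 0 = a := by
  obtain ⟨k, hk, hget⟩ := mem_mIdx a labels 0 i h
  subst hk
  simp only [zero_add, PySem.List.pyGet?_natCast, hget, Option.getD_some]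

-- ===== VERDICT (by name: the statement is the Claim_ definition above) =====
theorem underSampling_spec : Claim_equal_underSampling := by
  intro dataset labels aimedLabel times _ _
  unfold Spec_underSampling
  rw [underSampling_eq, underSampling_alt_eq]
  refine Prod.ext rfl ?_
  simp only
  apply List.map_congr_left
  intro i hi
  exact (labels_get_of_mem_mIdx labels aimedLabel i
    (List.mem_of_mem_drop hi)).symm
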